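-- pv_equiv track=rewrite | github.com/ThisIsMyAccountName/AoC23 | Day14_p2.py | solve_dir
-- ===== SOURCE A (Python) =====
-- def solve_dir(plane, dir):
-- 	transform = lambda plane : tuple(map(lambda x : "".join(x),[*zip(*plane)]))
-- 	if dir in "NS":
-- 		plane = transform(plane)
-- 	new_plane = ()
-- 	for row in plane:
-- 		new_row = ()
-- 		for part in row.split("#"):
-- 			new_row += ("".join(sorted(part, reverse = True if dir in "NW" else False)),)
-- 		new_plane += ("#".join(new_row),)
-- 	if dir in "NS":
-- 		new_plane = transform(new_plane)
-- 	return new_plane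
-- ===== SOURCE B (Python) =====
-- def solve_dir(plane, dir):
-- 	vert = dir in "NS"
-- 	rev = dir in "NW"
-- 	rows = list(map("".join, zip(*plane))) if vert else list(plane)
-- 	out = ["#".join(_tilt_segment(part, rev) for part in row.split("#")) for row in rows]
-- 	if vert:
-- 		out = list(map("".join, zip(*out)))
-- 	return tuple(out)
--
-- def _tilt_segment(part, rev):
-- 	counts = [0] * 128
-- 	for c in part:
-- 		counts[ord(c)] += 1
-- 	order = range(127, -1, -1) if rev else range(128)
-- 	return "".join(chr(k) * counts[k] for k in order)
-- ===== Notes on version B (the rewrite author's own statement) =====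
-- stated objective: faster
-- what changed: each wall-delimited segment is rearranged by a counting sort over the 128 ASCII codes (count occurrences, then emit codes in order) instead of calling comparison sort on every segment
import Mathlib
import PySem

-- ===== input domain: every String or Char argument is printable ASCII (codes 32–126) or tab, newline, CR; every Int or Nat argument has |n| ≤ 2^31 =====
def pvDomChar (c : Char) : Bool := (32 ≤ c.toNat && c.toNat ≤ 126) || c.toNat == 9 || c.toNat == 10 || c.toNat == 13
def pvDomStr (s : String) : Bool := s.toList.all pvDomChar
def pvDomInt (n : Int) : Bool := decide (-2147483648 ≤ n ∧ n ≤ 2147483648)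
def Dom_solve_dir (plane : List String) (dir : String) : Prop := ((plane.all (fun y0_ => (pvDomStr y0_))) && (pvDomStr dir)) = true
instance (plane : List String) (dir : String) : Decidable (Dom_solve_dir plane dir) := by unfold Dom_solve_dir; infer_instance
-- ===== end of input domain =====

-- B replaces the per-segment comparison sort by a counting sort over the 128 ASCII codes (objective: faster on long segments).

-- ===== PORT A =====
-- shared helper: Python's  tuple(map(lambda x: "".join(x), [*zip(*plane)]))  — both A and B contain this same zip-transpose.
-- zip(*rows): emit the heads while every row is nonempty, then stop (exactly Python's n-ary zip).
def pyZipCols (rows : List (List Char)) : List (List Char) :=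
  match rows with
  | [] => []
  | r :: rs =>
    if h : ((r :: rs).all (fun t => !t.isEmpty)) then
      ((r :: rs).map (fun t => t.headD ' ')) :: pyZipCols ((r :: rs).map List.tail)
    else []
termination_by (rows.headD []).length
decreasing_by
  simp only [List.map_cons, List.headD_cons]
  have hr : r ≠ [] := by
    simp only [List.all_cons, Bool.and_eq_true, Bool.not_eq_eq_eq_not, Bool.not_true] at h
    intro he; subst he; simp at h
  cases r with
  | nil => exact absurd rfl hr
  | cons a t => simp

def pyTransform (plane : List String) : List String :=
  (pyZipCols (plane.map String.toList)).map (fun cs => String.ofList cs)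

def solve_dir (plane : List String) (dir : String) : List String :=
  let plane1 := if PySem.Str.isIn dir "NS" then pyTransform plane else plane
  let rev := PySem.Str.isIn dir "NW"
  let new_plane := plane1.foldl (fun acc row =>
    let new_row := (PySem.Chars.splitOn row.toList ['#']).foldl
      (fun nr part => nr ++ [PySem.List.sorted part (fun x => x) rev]) []
    acc ++ [String.ofList (PySem.Chars.join ['#'] new_row)]) []
  if PySem.Str.isIn dir "NS" then pyTransform new_plane else new_plane

-- ===== PORT B =====
-- counting sort of one wall-free segment. Python's `counts[ord(c)] += 1` raises IndexError for ord(c) ≥ 128;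
-- Dom_solve_dir only admits chars with code < 128, where List.set is exact.
def countsOf (part : List Char) : List Nat :=
  part.foldl (fun cnt c => cnt.set c.toNat (cnt.getD c.toNat 0 + 1)) (List.replicate 128 0)

def emitCounts (cnt : List Nat) (rev : Bool) : List Char :=
  ((if rev then PySem.List.pyRange 127 (-1) (-1) else PySem.List.pyRange 0 128 1).foldl
    (fun acc k => acc ++ List.replicate (cnt.getD k.toNat 0) (Char.ofNat k.toNat)) [])

def solve_dir_alt (plane : List String) (dir : String) : List String :=
  let vert := PySem.Str.isIn dir "NS"
  let rev := PySem.Str.isIn dir "NW"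
  let rows := if vert then pyTransform plane else plane
  let out := rows.map (fun row =>
    String.ofList (PySem.Chars.join ['#']
      ((PySem.Chars.splitOn row.toList ['#']).map (fun part => emitCounts (countsOf part) rev))))
  if vert then pyTransform out else out

-- ===== PRECONDITION & SPEC =====
def Spec_solve_dir (plane : List String) (dir : String) (out : List String) : Prop := out = solve_dir_alt plane dir
instance (plane : List String) (dir : String) (out : List String) : Decidable (Spec_solve_dir plane dir out) := by unfold Spec_solve_dir; infer_instance

-- ===== CLAIM (what is proved, stated in full; the proofs are below) =====
def Claim_equal_solve_dir : Prop := ∀ (plane : List String) (dir : String), Dom_solve_dir plane dir → Spec_solve_dir plane dir (solve_dir plane dir)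

-- ===== LEMMAS AND PROOFS =====

-- chars below code 128 (Dom_solve_dir admits only such strings)
def smallChars (cs : List Char) : Prop := ∀ c ∈ cs, c.toNat < 128

lemma smallChars_of_dom (s : String) (h : pvDomStr s = true) : smallChars s.toList := by
  intro c hc
  simp only [pvDomStr, List.all_eq_true] at h
  have := h c hc
  simp only [pvDomChar, Bool.or_eq_true, Bool.and_eq_true, decide_eq_true_eq, beq_iff_eq] at this
  omega

-- every char of a splitOn piece is a char of the input (or of cur/acc in the worker)
lemma mem_splitOn_go (sep : List Char) (fuel : Nat) :
    ∀ (l cur : List Char) (acc : List (List Char)) (p : List Char),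
      p ∈ PySem.Chars.splitOn.go sep fuel l cur acc →
      ∀ c ∈ p, c ∈ l ∨ c ∈ cur ∨ ∃ q ∈ acc, c ∈ q := by
  induction fuel with
  | zero =>
    intro l cur acc p hp c hc
    rw [PySem.Chars.splitOn.go] at hp
    simp only [List.mem_reverse, List.mem_cons] at hp
    rcases hp with h | h
    · subst h; rcases List.mem_append.mp hc with h | h
      · exact Or.inr (Or.inl (List.mem_reverse.mp h))
      · exact Or.inl h
    · exact Or.inr (Or.inr ⟨p, h, hc⟩)
  | succ n ih =>
    intro l cur acc p hp c hc
    match l with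
    | [] =>
      rw [PySem.Chars.splitOn.go] at hp
      simp only [List.mem_reverse, List.mem_cons] at hp
      rcases hp with h | h
      · subst h; exact Or.inr (Or.inl (List.mem_reverse.mp hc))
      · exact Or.inr (Or.inr ⟨p, h, hc⟩)
      · omega
    | a :: rest =>
      rw [PySem.Chars.splitOn.go] at hp
      by_cases hpre : sep.isPrefixOf (a :: rest) = true
      · simp only [hpre, if_true] at hp
        rcases ih _ _ _ _ hp c hc with h | h | h
        · exact Or.inl (List.mem_of_mem_drop h)
        · simp at h
        · rcases h with ⟨q, hq, hcq⟩
          rcases List.mem_cons.mp hq with h | h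
          · subst h; exact Or.inr (Or.inl (List.mem_reverse.mp hcq))
          · exact Or.inr (Or.inr ⟨q, h, hcq⟩)
      · simp only [hpre] at hp
        rcases ih _ _ _ _ hp c hc with h | h | h
        · exact Or.inl (List.mem_cons_of_mem _ h)
        · rcases List.mem_cons.mp h with h | h
          · subst h; exact Or.inl List.mem_cons_self
          · exact Or.inr (Or.inl h)
        · exact Or.inr (Or.inr h)

lemma mem_splitOn (s sep p : List Char) (hp : p ∈ PySem.Chars.splitOn s sep) :
    ∀ c ∈ p, c ∈ s := by
  intro c hc
  rcases mem_splitOn_go sep (s.length + 1) s [] [] p hp c hc with h | h | h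
  · exact h
  · simp at h
  · simp at h

-- pyZipCols only rearranges chars of its input rows
lemma mem_pyZipCols (rows : List (List Char)) :
    ∀ r ∈ pyZipCols rows, ∀ c ∈ r, ∃ r' ∈ rows, c ∈ r' := by
  fun_induction pyZipCols rows with
  | case1 => intro r hr; simp at hr
  | case2 r0 rs h ih =>
    intro r hr c hc
    rcases List.mem_cons.mp hr with h1 | h1
    · subst h1
      rcases List.mem_map.mp hc with ⟨t, ht, hct⟩
      refine ⟨t, ht, ?_⟩
      have : ¬ t.isEmpty := by
        simp only [List.all_eq_true] at h
        simpa using h t ht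
      cases t with
      | nil => simp at this
      | cons a u => simp at hct; simp [hct]
    · rcases ih r h1 c hc with ⟨r', hr', hcr'⟩
      rcases List.mem_map.mp hr' with ⟨t, ht, rfl⟩
      exact ⟨t, ht, List.mem_of_mem_tail hcr'⟩
  | case3 => intro r hr; simp at hr

-- ===== counting-sort characterisation =====

lemma counts_loop : ∀ (part : List Char), smallChars part →
    ∀ (cnt : List Nat), cnt.length = 128 →
      ((part.foldl (fun cnt c => cnt.set c.toNat (cnt.getD c.toNat 0 + 1)) cnt).length = 128 ∧
       ∀ k, k < 128 →
        (part.foldl (fun cnt c => cnt.set c.toNat (cnt.getD c.toNat 0 + 1)) cnt).getD k 0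
          = cnt.getD k 0 + part.count (Char.ofNat k)) := by
  intro part
  induction part with
  | nil => intro _ cnt hl; exact ⟨hl, fun k _ => by simp⟩
  | cons c cs ih =>
    intro hs cnt hl
    have hc : c.toNat < 128 := hs c List.mem_cons_self
    have hs' : smallChars cs := fun x hx => hs x (List.mem_cons_of_mem _ hx)
    have hl' : (cnt.set c.toNat (cnt.getD c.toNat 0 + 1)).length = 128 := by
      simpa using hl
    rcases ih hs' _ hl' with ⟨hlen, hval⟩
    refine ⟨by simpa using hlen, fun k hk => ?_⟩
    rw [List.foldl_cons, hval k hk]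
    have hset : (cnt.set c.toNat (cnt.getD c.toNat 0 + 1)).getD k 0
        = if c.toNat = k then cnt.getD c.toNat 0 + 1 else cnt.getD k 0 := by
      simp only [List.getD_eq_getElem?_getD, List.getElem?_set]
      split_ifs with h1 <;> simp_all
    have hiff : (c == Char.ofNat k) = decide (c.toNat = k) := by
      rcases eq_or_ne c.toNat k with h | h
      · subst h; simp [Char.ofNat_toNat]
      · have hne : c ≠ Char.ofNat k := by
          intro he
          apply h
          rw [he, Char.toNat_ofNat, if_pos (Or.inl (by omega))]
        simp [h, hne]
    rw [hset, List.count_cons, hiff]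
    rcases eq_or_ne c.toNat k with h | h
    · subst h; simp; omega
    · simp [h]

lemma countsOf_getD (part : List Char) (hs : smallChars part) (k : Nat) (hk : k < 128) :
    (countsOf part).getD k 0 = part.count (Char.ofNat k) := by
  have := (counts_loop part hs (List.replicate 128 0) (by simp)).2 k hk
  unfold countsOf
  rw [this]
  have hz : (List.replicate 128 (0:Nat)).getD k 0 = 0 := by
    simp only [List.getD_eq_getElem?_getD, List.getElem?_replicate]
    simp [hk]
  rw [hz, Nat.zero_add]

-- literal evaluation of the two ranges B iterates over
lemma range_fwd : PySem.List.pyRange 0 128 1 = (List.range 128).map (Nat.cast) := by decide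
lemma range_rev : PySem.List.pyRange 127 (-1) (-1) = ((List.range 128).map (Nat.cast)).reverse := by
  decide

lemma emit_fwd (cnt : List Nat) :
    emitCounts cnt false
      = (List.range 128).flatMap (fun k => List.replicate (cnt.getD k 0) (Char.ofNat k)) := by
  unfold emitCounts
  rw [if_neg (by simp), range_fwd, PySem.List.foldl_append_eq_flatMap, List.flatMap_map]
  simp

lemma emit_rev (cnt : List Nat) :
    emitCounts cnt true = (emitCounts cnt false).reverse := by
  unfold emitCounts
  rw [if_pos rfl, if_neg (by simp), range_rev,
    PySem.List.foldl_append_eq_flatMap, PySem.List.foldl_append_eq_flatMap,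
    List.nil_append, List.nil_append, List.flatMap_reverse]
  congr 1
  apply List.flatMap_congr
  intro k _
  simp [Function.comp, List.reverse_replicate]

-- the canonical counting-sort output
def csort (part : List Char) : List Char :=
  (List.range 128).flatMap (fun k => List.replicate (part.count (Char.ofNat k)) (Char.ofNat k))

lemma sum_map_ite (n j v : Nat) (hj : j < n) :
    ((List.range n).map (fun k => if k = j then v else 0)).sum = v := by
  induction n with
  | zero => omega
  | succ m ih =>
    rw [List.range_succ, List.map_append, List.sum_append]
    by_cases h : j = m
    · subst h
      have : ((List.range j).map (fun k => if k = j then v else 0)).sum = 0 := by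
        apply List.sum_eq_zero
        intro x hx
        rcases List.mem_map.mp hx with ⟨k, hk, rfl⟩
        simp only [List.mem_range] at hk
        simp [Nat.ne_of_lt hk]
      simp [this]
    · have hj' : j < m := by omega
      rw [ih hj']
      simp [Ne.symm h]

lemma csort_perm (part : List Char) (hs : smallChars part) : (csort part).Perm part := by
  rw [List.perm_iff_count]
  intro x
  unfold csort
  rw [List.flatMap_def, List.count_flatten, List.map_map]
  have hterm : ∀ k ∈ List.range 128,
      (List.count x ∘ fun k => List.replicate (part.count (Char.ofNat k)) (Char.ofNat k)) k
        = if k = x.toNat ∧ x.toNat < 128 then part.count x else 0 := by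
    intro k hk
    simp only [List.mem_range] at hk
    have hvalid : (Char.ofNat k).toNat = k := by
      rw [Char.toNat_ofNat, if_pos]; exact Or.inl (by omega)
    simp only [Function.comp_apply, List.count_replicate]
    by_cases he : Char.ofNat k = x
    · have hx : x.toNat = k := by rw [← he, hvalid]
      rw [if_pos (by simp [he]), if_pos ⟨hx.symm, by omega⟩, he]
    · rw [if_neg (by simpa using he), if_neg]
      rintro ⟨rfl, hlt⟩
      exact he (Char.ofNat_toNat x)
  rw [List.map_congr_left hterm]
  by_cases hx : x.toNat < 128
  · have : (fun k => if k = x.toNat ∧ x.toNat < 128 then part.count x else 0)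
        = fun k => if k = x.toNat then part.count x else 0 := by
      funext k; by_cases h : k = x.toNat <;> simp [h, hx]
    rw [this, sum_map_ite 128 x.toNat (part.count x) hx]
  · have hz : ∀ y ∈ (List.range 128).map
        (fun k => if k = x.toNat ∧ x.toNat < 128 then part.count x else 0), y = 0 := by
      intro y hy
      rcases List.mem_map.mp hy with ⟨k, _, rfl⟩
      simp [hx]
    rw [List.sum_eq_zero hz]
    refine (List.count_eq_zero.mpr ?_).symm
    intro hmem
    exact hx (hs x hmem)

lemma csort_pairwise (part : List Char) : (csort part).Pairwise (fun a b => a ≤ b) := by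
  unfold csort
  rw [List.flatMap_def, List.pairwise_flatten]
  constructor
  · intro l hl
    rcases List.mem_map.mp hl with ⟨k, _, rfl⟩
    exact List.pairwise_replicate.mpr (Or.inr le_rfl)
  · rw [List.pairwise_map]
    have base : (List.range 128).Pairwise
        (fun k k' => k ∈ List.range 128 ∧ k' ∈ List.range 128 ∧ k < k') := by
      rw [← List.Pairwise.and_mem]
      exact List.pairwise_lt_range
    apply base.imp
    rintro k k' ⟨hk, hk', hlt⟩ x hx y hy
    simp only [List.mem_range] at hk hk'
    rw [List.eq_of_mem_replicate hx, List.eq_of_mem_replicate hy]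
    have h1 : (Char.ofNat k).toNat = k := by
      rw [Char.toNat_ofNat, if_pos]; exact Or.inl (by omega)
    have h2 : (Char.ofNat k').toNat = k' := by
      rw [Char.toNat_ofNat, if_pos]; exact Or.inl (by omega)
    show Char.ofNat k ≤ Char.ofNat k'
    rw [Char.le_def]
    have : (Char.ofNat k).toNat ≤ (Char.ofNat k').toNat := by omega
    exact this

lemma emitCounts_eq_csort (part : List Char) (hs : smallChars part) :
    emitCounts (countsOf part) false = csort part := by
  rw [emit_fwd]
  unfold csort
  apply List.flatMap_congr
  intro k hk
  rw [countsOf_getD part hs k (List.mem_range.mp hk)]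

lemma sorted_rev_id_eq (xs ys : List Char) (h : ys.Perm xs)
    (hp : ys.Pairwise (fun a b => b ≤ a)) :
    PySem.List.sorted xs (fun x => x) true = ys := by
  apply List.Perm.eq_of_pairwise (le := fun a b : Char => b ≤ a)
  · exact fun a b _ _ h1 h2 => le_antisymm h2 h1
  · exact PySem.List.sorted_pairwise_rev xs (fun x => x)
  · exact hp
  · exact (PySem.List.sorted_perm xs (fun x => x) true).trans h.symm

-- the key lemma: counting sort = Python's sorted, on sub-128 chars
lemma emit_eq_sorted (part : List Char) (hs : smallChars part) (rev : Bool) :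
    emitCounts (countsOf part) rev = PySem.List.sorted part (fun x => x) rev := by
  cases rev with
  | false =>
    rw [emitCounts_eq_csort part hs]
    exact (PySem.List.sorted_id_eq_of_perm_of_pairwise part (csort part)
      (csort_perm part hs) (csort_pairwise part)).symm
  | true =>
    rw [emit_rev, emitCounts_eq_csort part hs]
    refine (sorted_rev_id_eq part (csort part).reverse
      ((csort part).reverse_perm.trans (csort_perm part hs)) ?_).symm
    rw [List.pairwise_reverse]
    exact csort_pairwise part

-- ===== row / plane assembly =====

lemma row_eq (row : List Char) (hs : smallChars row) (rev : Bool) :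
    (PySem.Chars.splitOn row ['#']).foldl
      (fun nr part => nr ++ [PySem.List.sorted part (fun x => x) rev]) []
    = (PySem.Chars.splitOn row ['#']).map (fun part => emitCounts (countsOf part) rev) := by
  rw [PySem.List.foldl_append_singleton_eq_map]
  apply List.map_congr_left
  intro part hp
  exact (emit_eq_sorted part (fun c hc => hs c (mem_splitOn row ['#'] part hp c hc)) rev).symm

lemma planes_eq (plane1 : List String) (h : ∀ s ∈ plane1, smallChars s.toList) (rev : Bool) :
    plane1.foldl (fun acc row =>
      acc ++ [String.ofList (PySem.Chars.join ['#']
        ((PySem.Chars.splitOn row.toList ['#']).foldl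
          (fun nr part => nr ++ [PySem.List.sorted part (fun x => x) rev]) []))]) []
    = plane1.map (fun row =>
        String.ofList (PySem.Chars.join ['#']
          ((PySem.Chars.splitOn row.toList ['#']).map
            (fun part => emitCounts (countsOf part) rev)))) := by
  rw [PySem.List.foldl_append_singleton_eq_map]
  apply List.map_congr_left
  intro row hrow
  rw [row_eq row.toList (h row hrow) rev]

lemma smallChars_pyTransform (plane : List String)
    (h : ∀ s ∈ plane, smallChars s.toList) :
    ∀ s ∈ pyTransform plane, smallChars s.toList := by
  intro s hs c hc
  unfold pyTransform at hs
  rcases List.mem_map.mp hs with ⟨cs, hcs, rfl⟩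
  rw [String.toList_ofList] at hc
  rcases mem_pyZipCols _ cs hcs c hc with ⟨r', hr', hcr'⟩
  rcases List.mem_map.mp hr' with ⟨t, ht, rfl⟩
  exact h t ht c hcr'

-- ===== VERDICT (by name: the statement is the Claim_ definition above) =====
theorem solve_dir_spec : Claim_equal_solve_dir := by
  intro plane dir hdom
  unfold Spec_solve_dir solve_dir solve_dir_alt
  have hsmall : ∀ s ∈ plane, smallChars s.toList := by
    intro s hs
    unfold Dom_solve_dir at hdom
    simp only [Bool.and_eq_true, List.all_eq_true] at hdom
    exact smallChars_of_dom s (hdom.1 s hs)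
  by_cases hNS : PySem.Str.isIn dir "NS" = true
  · simp only [hNS, if_pos]
    rw [planes_eq (pyTransform plane) (smallChars_pyTransform plane hsmall) _]
  · simp only [hNS, Bool.false_eq_true, if_false]
    rw [planes_eq plane hsmall _]
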